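-- pv_equiv track=rewrite | github.com/liskos/ovsynnikov | zadanie_15/45.py | func
-- ===== SOURCE A (Python) =====
-- def func(a):
--     p = list(range(10, 20+1))
--     q = list(range(15, 30+1))
--     for x in range(-100, 100):
--         f = ((x not in p) or (x  in q)) or (x in a)
--         if not f:
--             return False
--     return True
-- ===== SOURCE B (Python) =====
-- def func(a):
--     return all(x in a for x in range(10, 15))
-- ===== Notes on version B (the rewrite author's own statement) =====
-- stated objective: simpler
-- what changed: Replaced the 200-iteration range(-100,100) scan with its p/q membership tables by a direct check that each of 10..14 (the only values whose test can fail) is in a.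
import Mathlib
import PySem

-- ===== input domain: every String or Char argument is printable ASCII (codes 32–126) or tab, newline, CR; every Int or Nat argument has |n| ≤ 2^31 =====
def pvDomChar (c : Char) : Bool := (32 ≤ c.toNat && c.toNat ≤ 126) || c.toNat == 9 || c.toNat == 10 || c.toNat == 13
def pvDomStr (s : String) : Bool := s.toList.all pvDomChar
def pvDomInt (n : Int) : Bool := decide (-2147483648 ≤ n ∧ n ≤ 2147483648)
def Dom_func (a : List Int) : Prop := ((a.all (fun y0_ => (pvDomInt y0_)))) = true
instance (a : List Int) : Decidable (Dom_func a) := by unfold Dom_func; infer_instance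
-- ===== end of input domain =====

-- B replaces A's fixed 200-iteration scan (with its p/q tables) by directly checking 10..14 ∈ a; objective: simpler.

-- ===== PORT A =====
-- the `for x in range(-100,100): ... return False` loop with early return
def funcLoop (p q a : List Int) : List Int → Bool
  | [] => true
  | x :: xs =>
    let f := ((!(p.contains x)) || q.contains x) || a.contains x
    if !f then false else funcLoop p q a xs

def func (a : List Int) : Bool :=
  let p := PySem.List.pyRange 10 (20 + 1) 1
  let q := PySem.List.pyRange 15 (30 + 1) 1
  funcLoop p q a (PySem.List.pyRange (-100) 100 1)

-- ===== PORT B =====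
def func_alt (a : List Int) : Bool :=
  (PySem.List.pyRange 10 15 1).all (fun x => a.contains x)

-- ===== PRECONDITION & SPEC =====
def Spec_func (a : List Int) (out : Bool) : Prop := out = func_alt a
instance (a : List Int) (out : Bool) : Decidable (Spec_func a out) := by unfold Spec_func; infer_instance

-- ===== CLAIM (what is proved, stated in full; the proofs are below) =====
def Claim_equal_func : Prop := ∀ (a : List Int), Dom_func a → Spec_func a (func a)

-- ===== LEMMAS AND PROOFS =====

-- the early-return loop is the conjunction of its per-element tests
theorem funcLoop_all (p q a xs : List Int) :
    funcLoop p q a xs = xs.all (fun x => ((!(p.contains x)) || q.contains x) || a.contains x) := by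
  induction xs with
  | nil => rfl
  | cons x xs ih =>
    simp only [funcLoop, ih, List.all_cons]
    cases ((!(p.contains x)) || q.contains x) || a.contains x <;> simp

theorem func_eq (a : List Int) : func a = func_alt a := by
  simp only [func, func_alt, funcLoop_all]
  rw [Bool.eq_iff_iff]
  simp only [List.all_eq_true, Bool.or_eq_true, Bool.not_eq_true',
    List.contains_eq_mem, PySem.List.mem_pyRange_one, decide_eq_true_eq,
    decide_eq_false_iff_not]
  constructor
  · intro h x hx
    rcases h x (by omega) with (h' | h') | h'
    · omega
    · omega
    · exact h'
  · intro h x _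
    by_cases hx2 : 10 ≤ x ∧ x < 15
    · exact Or.inr (h x hx2)
    · left; omega

-- ===== VERDICT (by name: the statement is the Claim_ definition above) =====
theorem func_spec : Claim_equal_func := by
  intro a _
  exact func_eq a
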